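-- pv_equiv track=rewrite | github.com/bhofmei/analysis-scripts | chip/chip_ortholog_compare2.py | trimGenic
-- ===== SOURCE A (Python) =====
-- def trimGenic( geneAr, fpkmAr, fpkmValAr ):
-- 	'''
-- 		selects numFeatures input genes from geneAr
-- 		genes are then ordered by FPKM ranking
-- 	'''
--
-- 	tmpAr = []
--
-- 	for i in range(len(geneAr)):
-- 		try:
-- 			fpkm = fpkmAr.index( geneAr[i][0] )
-- 			tmpAr += [ (fpkm, geneAr[i][0], geneAr[i][1], fpkmValAr[ fpkm ] ) ]
-- 		except ValueError:
-- 			continue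
--
-- 	#tmpAr.sort(reverse=True)
-- 	tmpAr.sort()
--
-- 	# separate
-- 	fpkmAr = []
-- 	outAr1= []
-- 	outAr2 = []
-- 	for i in tmpAr:
-- 		fpkmAr += [ i[3] ]
-- 		outAr1 += [ i[1] ]
-- 		outAr2 += [ i[2] ]
-- 	return [ outAr1, outAr2 ], fpkmAr
-- ===== SOURCE B (Python) =====
-- def trimGenic(geneAr, fpkmAr, fpkmValAr):
--     # Bucket (distribution) sort: one bucket per fpkmAr position; distribute each
--     # matching gene's partner into its bucket, then walk positions in order,
--     # sorting each small bucket by gene1 -- no comparison sort of the whole list.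
--     seen = {}
--     for i, name in enumerate(fpkmAr):
--         if name not in seen:
--             seen[name] = i
--     buckets = [[] for _ in fpkmAr]
--     for g0, g1 in geneAr:
--         if g0 in seen:
--             buckets[seen[g0]].append(g1)
--     out1, out2, fp = [], [], []
--     for pos, b in enumerate(buckets):
--         if b:
--             b.sort()
--             for g1 in b:
--                 out1.append(fpkmAr[pos])
--                 out2.append(g1)
--                 fp.append(fpkmValAr[pos])
--     return [out1, out2], fp
-- ===== Notes on version B (the rewrite author's own statement) =====
-- stated objective: faster
-- what changed: B replaces A's comparison sort of repeatedly-index-scanned 4-tuples by a distribution (bucket) sort: a first-index dict over fpkmAr built once, one pass dropping each matched gene1 into the bucket of its fpkm position, then a walk over positions in order emitting each bucket (sorted by gene1) with fpkmAr[pos] and fpkmValAr[pos].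
import Mathlib
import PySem

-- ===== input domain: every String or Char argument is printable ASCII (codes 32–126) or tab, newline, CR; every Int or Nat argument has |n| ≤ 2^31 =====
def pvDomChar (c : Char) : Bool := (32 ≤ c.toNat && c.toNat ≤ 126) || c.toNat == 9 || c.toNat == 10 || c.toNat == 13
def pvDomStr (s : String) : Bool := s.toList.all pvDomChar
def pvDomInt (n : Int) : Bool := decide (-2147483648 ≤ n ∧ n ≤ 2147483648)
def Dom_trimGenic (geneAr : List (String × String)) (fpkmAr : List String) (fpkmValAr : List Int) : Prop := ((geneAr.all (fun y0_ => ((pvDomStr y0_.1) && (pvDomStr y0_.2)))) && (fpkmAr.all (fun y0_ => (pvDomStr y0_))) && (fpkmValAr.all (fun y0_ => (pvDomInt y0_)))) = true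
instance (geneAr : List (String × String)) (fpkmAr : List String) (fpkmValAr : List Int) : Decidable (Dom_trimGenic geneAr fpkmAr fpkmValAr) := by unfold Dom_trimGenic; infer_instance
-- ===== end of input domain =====

-- B replaces A's comparison sort of .index-scanned 4-tuples by a distribution (bucket)
-- sort over fpkm positions, sorting only each small bucket by gene1 (objective: faster).

-- ===== PORT A =====
-- Python tuple comparison of the 4-tuples tmpAr.sort() compares is lexicographic:
-- ported exactly as the nested Lex key below.
def pvKey4 (t : Int × String × String × Int) : Lex (Int × Lex (String × Lex (String × Int))) :=
  toLex (t.1, toLex (t.2.1, toLex (t.2.2.1, t.2.2.2)))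

def trimGenic (geneAr : List (String × String)) (fpkmAr : List String) (fpkmValAr : List Int) : List (List String) × List Int :=
  let tmpAr : List (Int × String × String × Int) :=
    geneAr.foldl (fun acc g =>
      match PySem.List.index? fpkmAr g.1 with
      | some fpkm => acc ++ [((fpkm : Int), g.1, g.2, PySem.List.pyGetD fpkmValAr (fpkm : Int) 0)]
      | none => acc) []
  let sortedTmp := PySem.List.sorted tmpAr pvKey4 false
  let split := sortedTmp.foldl
    (fun (s : List Int × List String × List String) t =>
      (s.1 ++ [t.2.2.2], s.2.1 ++ [t.2.1], s.2.2 ++ [t.2.2.1])) ([], [], [])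
  ([split.2.1, split.2.2], split.1)

-- ===== PORT B =====
-- buckets[seen[g0]].append(g1) is ported as set/getD on the buckets list; the index
-- seen[g0] is an enumerate index, hence 0 ≤ i < len(buckets), so .toNat is exact here.
def trimGenic_alt (geneAr : List (String × String)) (fpkmAr : List String) (fpkmValAr : List Int) : List (List String) × List Int :=
  let seen : PySem.Dict String Int :=
    (PySem.List.enumerate fpkmAr).foldl
      (fun d p => if d.contains p.2 then d else d.insert p.2 p.1) PySem.Dict.empty
  let buckets0 : List (List String) := fpkmAr.map (fun _ => ([] : List String))
  let buckets := geneAr.foldl (fun bs g =>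
      match seen.get? g.1 with
      | some i => bs.set i.toNat (bs.getD i.toNat [] ++ [g.2])
      | none => bs) buckets0
  let res := (PySem.List.enumerate buckets).foldl
      (fun (s : List String × List String × List Int) pb =>
        if pb.2.isEmpty then s
        else
          let b := PySem.List.sorted pb.2 (fun x => x) false
          (s.1 ++ b.map (fun _ => PySem.List.pyGetD fpkmAr pb.1 ""),
           s.2.1 ++ b,
           s.2.2 ++ b.map (fun _ => PySem.List.pyGetD fpkmValAr pb.1 0)))
      ([], [], [])
  ([res.1, res.2.1], res.2.2)

-- ===== PRECONDITION & SPEC =====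
-- Pre_ excludes exactly the inputs where the Python A raises an uncaught IndexError:
-- some gene's first index in fpkmAr is not a valid index into fpkmValAr (B raises there too).
def Pre_trimGenic (geneAr : List (String × String)) (fpkmAr : List String) (fpkmValAr : List Int) : Prop :=
  ∀ g ∈ geneAr, (PySem.List.index? fpkmAr g.1).all (fun k => decide (k < fpkmValAr.length)) = true
instance (geneAr : List (String × String)) (fpkmAr : List String) (fpkmValAr : List Int) : Decidable (Pre_trimGenic geneAr fpkmAr fpkmValAr) := by unfold Pre_trimGenic; infer_instance

def pvWitness_trimGenic : (List (String × String)) × List String × List Int :=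
  ([("g1", "ga"), ("g2", "gb"), ("zz", "gc"), ("g1", "gd")], ["g2", "g1", "g3"], [7, 5, 9])

def Spec_trimGenic (geneAr : List (String × String)) (fpkmAr : List String) (fpkmValAr : List Int) (out : List (List String) × List Int) : Prop := out = trimGenic_alt geneAr fpkmAr fpkmValAr
instance (geneAr : List (String × String)) (fpkmAr : List String) (fpkmValAr : List Int) (out : List (List String) × List Int) : Decidable (Spec_trimGenic geneAr fpkmAr fpkmValAr out) := by unfold Spec_trimGenic; infer_instance

-- ===== CLAIM (what is proved, stated in full; the proofs are below) =====
def Claim_equal_trimGenic : Prop := ∀ (geneAr : List (String × String)) (fpkmAr : List String) (fpkmValAr : List Int), Dom_trimGenic geneAr fpkmAr fpkmValAr → Pre_trimGenic geneAr fpkmAr fpkmValAr → Spec_trimGenic geneAr fpkmAr fpkmValAr (trimGenic geneAr fpkmAr fpkmValAr)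

-- ===== LEMMAS AND PROOFS =====

-- key and projection shared by the proofs
def pvKey2 (p : Int × String) : Lex (Int × String) := toLex p
def pvCmp2 (a b : Int × String) : Bool := decide (pvKey2 a < pvKey2 b)
def pvCmpS (a b : String) : Bool := decide (a < b)

-- the projection that reconstructs A's 4-tuple from a (position, gene1) pair
def pvF (fpkmAr : List String) (fpkmValAr : List Int) (p : Int × String) : Int × String × String × Int :=
  (p.1, PySem.List.pyGetD fpkmAr p.1 "", p.2, PySem.List.pyGetD fpkmValAr p.1 0)

-- the bucket of position p, and the bucketized (position, gene1) stream
def pvBk (L : List (Int × String)) (p : Int) : List String :=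
  L.filterMap (fun q => if q.1 = p then some q.2 else none)

def pvBucketize (L : List (Int × String)) (ps : List Int) : List (Int × String) :=
  ps.flatMap (fun p => (PySem.List.sorted (pvBk L p) (fun x => x) false).map (fun s => (p, s)))

theorem pv_tmp_filterMap (fpkmAr : List String) (fpkmValAr : List Int)
    (geneAr : List (String × String)) (acc : List (Int × String × String × Int)) :
    geneAr.foldl (fun acc g =>
      match PySem.List.index? fpkmAr g.1 with
      | some fpkm => acc ++ [((fpkm : Int), g.1, g.2, PySem.List.pyGetD fpkmValAr (fpkm : Int) 0)]
      | none => acc) acc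
    = acc ++ geneAr.filterMap (fun g => (PySem.List.index? fpkmAr g.1).map
        (fun (k : Nat) => ((k : Int), g.1, g.2, PySem.List.pyGetD fpkmValAr (k : Int) 0))) := by
  induction geneAr generalizing acc with
  | nil => simp
  | cons g gs ih =>
    rw [List.foldl_cons, List.filterMap_cons]
    cases h : PySem.List.index? fpkmAr g.1 with
    | none => simp only [Option.map_none]; rw [ih]
    | some k => simp only [Option.map_some]; rw [ih]; simp

theorem pv_first_get (fpkmAr : List String) (name : String) :
    ∀ (s : Int) (d : PySem.Dict String Int),
    (((PySem.List.enumerate fpkmAr s).foldl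
        (fun d p => if d.contains p.2 then d else d.insert p.2 p.1) d).get? name)
    = (d.get? name).or ((PySem.List.index? fpkmAr name).map (fun (k : Nat) => s + (k : Int))) := by
  induction fpkmAr with
  | nil => intro s d; simp [PySem.List.enumerate_nil, PySem.List.index?_eq_idxOf?]
  | cons x xs ih =>
    intro s d
    rw [PySem.List.enumerate_cons, List.foldl_cons]
    change (List.foldl _ (if d.contains x = true then d else d.insert x s)
      (PySem.List.enumerate xs (s + 1))).get? name = _
    by_cases hx : x = name
    · subst hx
      rw [PySem.List.index?_cons_self]
      by_cases hc : d.contains x = true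
      · obtain ⟨v, hv⟩ := Option.isSome_iff_exists.mp
          (by rwa [PySem.Dict.contains_eq_isSome_get?] at hc)
        simp only [hc, if_true, ih, hv]
        simp
      · have hs : d.get? x = none := by
          rw [PySem.Dict.contains_eq_isSome_get?] at hc
          exact Option.not_isSome_iff_eq_none.mp (by simpa using hc)
        simp only [hc, ih, hs]
        simp
    · rw [PySem.List.index?_cons_of_ne _ fun he => hx he]
      have htail : ∀ d' : PySem.Dict String Int, d'.get? name = d.get? name →
          ((PySem.List.enumerate xs (s + 1)).foldl
            (fun d p => if d.contains p.2 then d else d.insert p.2 p.1) d').get? name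
          = (d.get? name).or (((PySem.List.index? xs name).map (fun x => x + 1)).map
              (fun (k : Nat) => s + (k : Int))) := by
        intro d' hd'
        rw [ih, hd', Option.map_map]
        cases hi : PySem.List.index? xs name with
        | none => simp
        | some k =>
          simp only [Option.map_some, Function.comp_apply]
          congr 1
          congr 1
          push_cast
          ring
      by_cases hc : d.contains x = true
      · simp only [hc, if_true]
        exact htail d rfl
      · simp only [hc]
        exact htail (d.insert x s) (PySem.Dict.get?_insert_of_ne d s (Ne.symm hx))

-- first-occurrence dict lookup IS list.index
theorem pv_seen_get (fpkmAr : List String) (name : String) :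
    (((PySem.List.enumerate fpkmAr).foldl
        (fun d p => if d.contains p.2 then d else d.insert p.2 p.1)
        PySem.Dict.empty).get? name)
    = (PySem.List.index? fpkmAr name).map (fun (k : Nat) => (k : Int)) := by
  rw [pv_first_get fpkmAr name 0 PySem.Dict.empty]
  have hempty : (PySem.Dict.empty : PySem.Dict String Int).get? name = none := rfl
  simp [hempty]

-- tuple comparison on the 4-tuples agrees with pair comparison through pvF
theorem pv_before_compat (fpkmAr : List String) (fpkmValAr : List Int) (a b : Int × String) :
    decide (pvKey4 (pvF fpkmAr fpkmValAr a) < pvKey4 (pvF fpkmAr fpkmValAr b))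
    = pvCmp2 a b := by
  rcases a with ⟨i, g⟩; rcases b with ⟨j, h⟩
  apply decide_eq_decide.mpr
  simp only [pvKey4, pvKey2, pvF, Prod.Lex.toLex_lt_toLex]
  constructor
  · rintro (hij | ⟨rfl, (hs | ⟨-, (hg | ⟨rfl, hv⟩)⟩)⟩)
    · exact Or.inl hij
    · exact absurd hs (lt_irrefl _)
    · exact Or.inr ⟨rfl, hg⟩
    · exact absurd hv (lt_irrefl _)
  · rintro (hij | ⟨rfl, hg⟩)
    · exact Or.inl hij
    · exact Or.inr ⟨rfl, Or.inr ⟨rfl, Or.inl hg⟩⟩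

theorem pv_insertBy_map {α β : Type} (f : α → β) (p : α → α → Bool) (q : β → β → Bool)
    (h : ∀ a b, q (f a) (f b) = p a b) (x : α) (l : List α) :
    PySem.List.insertBy q (f x) (l.map f) = (PySem.List.insertBy p x l).map f := by
  induction l with
  | nil => simp [PySem.List.insertBy]
  | cons y ys ih =>
    simp only [List.map_cons, PySem.List.insertBy, h]
    by_cases hb : p x y
    · simp [hb]
    · simp [hb, ih]

theorem pv_sorted_map (fpkmAr : List String) (fpkmValAr : List Int) (l : List (Int × String)) :
    PySem.List.sorted (l.map (pvF fpkmAr fpkmValAr)) pvKey4 false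
    = (PySem.List.sorted l pvKey2 false).map (pvF fpkmAr fpkmValAr) := by
  show (l.map (pvF fpkmAr fpkmValAr)).foldl
      (fun acc x => PySem.List.insertBy (fun a b => decide (pvKey4 a < pvKey4 b)) x acc) ([].map (pvF fpkmAr fpkmValAr))
    = (l.foldl (fun acc x => PySem.List.insertBy (fun a b => decide (pvKey2 a < pvKey2 b)) x acc) []).map (pvF fpkmAr fpkmValAr)
  generalize ([] : List (Int × String)) = acc
  induction l generalizing acc with
  | nil => rfl
  | cons x xs ih =>
    simp only [List.map_cons, List.foldl_cons]
    rw [pv_insertBy_map (pvF fpkmAr fpkmValAr) _ _ (pv_before_compat fpkmAr fpkmValAr) x acc]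
    exact ih (PySem.List.insertBy pvCmp2 x acc)

theorem pv_split_loop (l : List (Int × String × String × Int))
    (acc : List Int × List String × List String) :
    l.foldl (fun (s : List Int × List String × List String) t =>
      (s.1 ++ [t.2.2.2], s.2.1 ++ [t.2.1], s.2.2 ++ [t.2.2.1])) acc
    = (acc.1 ++ l.map (fun t => t.2.2.2), acc.2.1 ++ l.map (fun t => t.2.1),
       acc.2.2 ++ l.map (fun t => t.2.2.1)) := by
  induction l generalizing acc with
  | nil => simp
  | cons t ts ih => simp [List.foldl_cons, ih]

-- ---- bucket-sort correctness ----

theorem pv_insert_head {α : Type} (q : α → α → Bool) (x : α) (l : List α)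
    (h : ∀ y ∈ l, q x y = true) :
    PySem.List.insertBy q x l = x :: l := by
  cases l with
  | nil => rfl
  | cons y ys => simp [PySem.List.insertBy, h y (by simp)]

theorem pv_insert_skip {α : Type} (q : α → α → Bool) (x : α) (l1 l2 : List α)
    (h : ∀ y ∈ l1, q x y = false) :
    PySem.List.insertBy q x (l1 ++ l2) = l1 ++ PySem.List.insertBy q x l2 := by
  induction l1 with
  | nil => rfl
  | cons y ys ih =>
    simp only [List.cons_append, PySem.List.insertBy, h y (by simp)]
    simp only [Bool.false_eq_true, if_false, List.cons.injEq, true_and]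
    exact ih (fun z hz => h z (by simp [hz]))

theorem pv_cmp2_same_fst (p : Int) (s t : String) :
    pvCmp2 (p, s) (p, t) = pvCmpS s t := by
  apply decide_eq_decide.mpr
  simp [pvKey2, Prod.Lex.toLex_lt_toLex]

theorem pv_insert_seg (p : Int) (s : String) (sb : List String) (rest : List (Int × String))
    (hrest : ∀ y ∈ rest, pvCmp2 (p, s) y = true) :
    PySem.List.insertBy pvCmp2 (p, s) ((sb.map (fun t => (p, t))) ++ rest)
    = (PySem.List.insertBy pvCmpS s sb).map (fun t => (p, t)) ++ rest := by
  induction sb with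
  | nil =>
    simp only [List.map_nil, List.nil_append]
    rw [pv_insert_head pvCmp2 _ rest hrest]
    rfl
  | cons t ts ih =>
    simp only [List.map_cons, List.cons_append, PySem.List.insertBy, pv_cmp2_same_fst]
    by_cases hb : pvCmpS s t = true
    · simp [hb]
    · simp only [Bool.not_eq_true] at hb
      simp [hb, ih]

theorem pv_mem_bucketize_fst (L : List (Int × String)) (ps : List Int)
    (y : Int × String) (hy : y ∈ pvBucketize L ps) : y.1 ∈ ps := by
  simp only [pvBucketize, List.mem_flatMap, List.mem_map] at hy
  obtain ⟨p, hp, s, -, rfl⟩ := hy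
  exact hp

theorem pv_bk_append (L : List (Int × String)) (x : Int × String) (p : Int) :
    pvBk (L ++ [x]) p = pvBk L p ++ (if x.1 = p then [x.2] else []) := by
  simp only [pvBk, List.filterMap_append, List.filterMap_cons, List.filterMap_nil]
  split_ifs with h <;> simp

theorem pv_sorted_snoc {α κ : Type} [LT κ] [DecidableLT κ] (key : α → κ) (l : List α) (x : α) :
    PySem.List.sorted (l ++ [x]) key false
    = PySem.List.insertBy (fun a b => decide (key a < key b)) x (PySem.List.sorted l key false) := by
  rw [PySem.List.sorted_eq_foldl_insertBy, PySem.List.sorted_eq_foldl_insertBy, List.foldl_append]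
  rfl

theorem pv_insert_bucketize (M : List (Int × String)) (x : Int × String) :
    ∀ ps : List Int, ps.Pairwise (· < ·) → x.1 ∈ ps →
    PySem.List.insertBy pvCmp2 x (pvBucketize M ps) = pvBucketize (M ++ [x]) ps := by
  intro ps
  induction ps with
  | nil => intro _ h; simp at h
  | cons p ps' ih =>
    intro hpw hmem
    have hpw' := (List.pairwise_cons.mp hpw).2
    have hlt := (List.pairwise_cons.mp hpw).1
    by_cases hx : x.1 = p
    · -- insert into this segment
      have hrest : ∀ y ∈ pvBucketize M ps', pvCmp2 x y = true := by
        intro y hy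
        have h1 : p < y.1 := hlt y.1 (pv_mem_bucketize_fst M ps' y hy)
        rcases x with ⟨x1, x2⟩; rcases y with ⟨y1, y2⟩
        simp only at hx h1
        subst hx
        simp [pvCmp2, pvKey2, Prod.Lex.toLex_lt_toLex, h1]
      have htail : pvBucketize (M ++ [x]) ps' = pvBucketize M ps' := by
        apply List.flatMap_congr  -- congruence over ps'
        intro p' hp'
        have : x.1 ≠ p' := by
          have := hlt p' hp'; omega
        rw [pv_bk_append, if_neg this, List.append_nil]
      rcases x with ⟨x1, x2⟩
      simp only at hx; subst hx
      have hseg := pv_insert_seg x1 x2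
        (PySem.List.sorted (pvBk M x1) (fun x => x) false) (pvBucketize M ps') hrest
      have hbk : pvBk (M ++ [(x1, x2)]) x1 = pvBk M x1 ++ [x2] := by
        rw [pv_bk_append]; simp
      have htl : pvBucketize (M ++ [(x1, x2)]) ps' = pvBucketize M ps' := htail
      simp only [pvBucketize, List.flatMap_cons] at hseg htl ⊢
      rw [hseg, htl, hbk, pv_sorted_snoc]
      rfl
    · -- skip this segment
      have hmem' : x.1 ∈ ps' := by
        rcases List.mem_cons.mp hmem with h | h
        · exact absurd h hx
        · exact h
      have hseg : ∀ y ∈ (PySem.List.sorted (pvBk M p) (fun x => x) false).map (fun s => (p, s)),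
          pvCmp2 x y = false := by
        intro y hy
        simp only [List.mem_map] at hy
        obtain ⟨s, -, rfl⟩ := hy
        have h1 : p < x.1 := hlt x.1 hmem'
        rcases x with ⟨x1, x2⟩
        simp only at h1
        simp only [pvCmp2, pvKey2, Prod.Lex.toLex_lt_toLex, decide_eq_false_iff_not]
        rintro (h | ⟨rfl, -⟩)
        · omega
        · omega
      have hbk : pvBk (M ++ [x]) p = pvBk M p := by
        rw [pv_bk_append, if_neg hx, List.append_nil]
      have := ih hpw' hmem'
      simp only [pvBucketize, List.flatMap_cons] at this ⊢
      rw [pv_insert_skip pvCmp2 x _ _ hseg, hbk, this]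

theorem pv_sorted_eq_bucketize (ps : List Int) (hpw : ps.Pairwise (· < ·)) :
    ∀ L : List (Int × String), (∀ q ∈ L, q.1 ∈ ps) →
    PySem.List.sorted L pvKey2 false = pvBucketize L ps := by
  intro L
  induction L using List.reverseRecOn with
  | nil =>
    intro _
    simp [pvBucketize, pvBk, PySem.List.sorted_eq_foldl_insertBy]
  | append_singleton M x ih =>
    intro hmem
    rw [pv_sorted_snoc]
    have : (fun (a b : Int × String) => decide (pvKey2 a < pvKey2 b)) = pvCmp2 := rfl
    rw [this, ih (fun q hq => hmem q (by simp [hq]))]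
    exact pv_insert_bucketize M x ps hpw (hmem x (by simp))

-- ---- bucket distribution characterization ----

def pvDistStep (bs : List (List String)) (q : Int × String) : List (List String) :=
  bs.set q.1.toNat (bs.getD q.1.toNat [] ++ [q.2])

theorem pv_dist_as_pairs (seen : PySem.Dict String Int) (geneAr : List (String × String)) :
    ∀ bs : List (List String),
    geneAr.foldl (fun bs g =>
      match seen.get? g.1 with
      | some i => bs.set i.toNat (bs.getD i.toNat [] ++ [g.2])
      | none => bs) bs
    = (geneAr.filterMap (fun g => (seen.get? g.1).map (fun i => (i, g.2)))).foldl pvDistStep bs := by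
  induction geneAr with
  | nil => intro bs; rfl
  | cons g gs ih =>
    intro bs
    rw [List.foldl_cons, List.filterMap_cons]
    cases h : seen.get? g.1 with
    | none => simp only [Option.map_none]; exact ih bs
    | some i => simp only [Option.map_some, List.foldl_cons]; exact ih _

theorem pv_dist_length (L : List (Int × String)) :
    ∀ bs : List (List String), (L.foldl pvDistStep bs).length = bs.length := by
  induction L with
  | nil => intro bs; rfl
  | cons q qs ih => intro bs; rw [List.foldl_cons, ih, pvDistStep, List.length_set]

theorem pv_dist_getElem? (L : List (Int × String)) :
    ∀ bs : List (List String), (∀ q ∈ L, 0 ≤ q.1 ∧ q.1.toNat < bs.length) →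
    ∀ k : ℕ, (L.foldl pvDistStep bs)[k]? = bs[k]?.map (fun b => b ++ pvBk L (k : Int)) := by
  induction L using List.reverseRecOn with
  | nil =>
    intro bs _ k
    simp [pvBk]
  | append_singleton M x ih =>
    intro bs hb k
    rw [List.foldl_append, List.foldl_cons, List.foldl_nil]
    have hbM : ∀ q ∈ M, 0 ≤ q.1 ∧ q.1.toNat < bs.length := fun q hq => hb q (by simp [hq])
    have hx := hb x (by simp)
    have hlenM : (M.foldl pvDistStep bs).length = bs.length := pv_dist_length M bs
    simp only [pvDistStep]
    have hgetD : (M.foldl pvDistStep bs).getD x.1.toNat []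
        = bs[x.1.toNat]'(hx.2) ++ pvBk M (x.1.toNat : Int) := by
      rw [List.getD_eq_getElem?_getD, ih bs hbM x.1.toNat, List.getElem?_eq_getElem hx.2]
      simp
    rw [List.getElem?_set, hgetD]
    by_cases hxy : x.1.toNat = k
    · subst hxy
      have hx1 : x.1 = (x.1.toNat : Int) := by omega
      rw [if_pos rfl, hlenM, if_pos hx.2, List.getElem?_eq_getElem hx.2, pv_bk_append,
          if_pos hx1]
      simp [List.append_assoc]
    · rw [if_neg hxy, ih bs hbM k, pv_bk_append]
      have : x.1 ≠ (k : Int) := by omega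
      rw [if_neg this, List.append_nil]

-- enumerate of a range-indexed map
theorem pv_enum_snoc {α : Type} (l : List α) (x : α) (s : Int) :
    PySem.List.enumerate (l ++ [x]) s = PySem.List.enumerate l s ++ [(s + l.length, x)] := by
  rw [PySem.List.enumerate_append]
  rfl

theorem pv_enum_map_range {α : Type} (f : ℕ → α) :
    ∀ n : ℕ, PySem.List.enumerate ((List.range n).map f) 0
      = (List.range n).map (fun k : ℕ => ((k : Int), f k)) := by
  intro n
  induction n with
  | zero => rfl
  | succ m ih =>
    rw [List.range_succ, List.map_append, List.map_append]
    simp only [List.map_cons, List.map_nil]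
    rw [pv_enum_snoc, ih]
    simp

-- B's output loop produces the three columns of the bucketized stream
theorem pv_bcols (fpkmAr : List String) (fpkmValAr : List Int)
    (segs : List (Int × List String)) :
    ∀ acc : List String × List String × List Int,
    segs.foldl (fun (s : List String × List String × List Int) pb =>
        if pb.2.isEmpty then s
        else
          let b := PySem.List.sorted pb.2 (fun x => x) false
          (s.1 ++ b.map (fun _ => PySem.List.pyGetD fpkmAr pb.1 ""),
           s.2.1 ++ b,
           s.2.2 ++ b.map (fun _ => PySem.List.pyGetD fpkmValAr pb.1 0))) acc
    = (let T := segs.flatMap (fun pb =>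
          (PySem.List.sorted pb.2 (fun x => x) false).map (fun t => (pb.1, t)));
       (acc.1 ++ T.map (fun q => PySem.List.pyGetD fpkmAr q.1 ""),
        acc.2.1 ++ T.map (fun q => q.2),
        acc.2.2 ++ T.map (fun q => PySem.List.pyGetD fpkmValAr q.1 0))) := by
  induction segs with
  | nil => intro acc; simp
  | cons pb rest ih =>
    intro acc
    rw [List.foldl_cons]
    by_cases he : pb.2.isEmpty
    · have : pb.2 = [] := List.isEmpty_iff.mp he
      simp only [he, if_true, ih]
      simp [this, PySem.List.sorted_eq_foldl_insertBy]
    · simp only [he, ih]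
      simp [List.map_map, Function.comp_def, List.append_assoc, PySem.List.length_sorted]

-- ===== VERDICT (by name: the statement is the Claim_ definition above) =====
theorem trimGenic_spec : Claim_equal_trimGenic := by
  intro geneAr fpkmAr fpkmValAr _ _
  simp only [Spec_trimGenic, trimGenic, trimGenic_alt]
  rw [pv_tmp_filterMap, List.nil_append]
  -- shared pair stream
  set seen : PySem.Dict String Int :=
    (PySem.List.enumerate fpkmAr).foldl
      (fun d p => if d.contains p.2 then d else d.insert p.2 p.1) PySem.Dict.empty with hseen
  set pairs : List (Int × String) :=
    geneAr.filterMap (fun g => (seen.get? g.1).map (fun i => (i, g.2))) with hpairs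
  -- A's tmpAr is pairs through pvF
  have hfM : (geneAr.filterMap (fun g => (PySem.List.index? fpkmAr g.1).map
        (fun (k : Nat) => ((k : Int), g.1, g.2, PySem.List.pyGetD fpkmValAr (k : Int) 0))))
      = pairs.map (pvF fpkmAr fpkmValAr) := by
    rw [hpairs, List.map_filterMap]
    apply List.filterMap_congr
    intro g _
    rw [hseen, pv_seen_get fpkmAr g.1]
    cases h : PySem.List.index? fpkmAr g.1 with
    | none => simp
    | some k =>
      obtain ⟨hk, hget, -⟩ := PySem.List.getElem_of_index?_eq_some h
      simp only [Option.map_some]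
      simp [pvF, PySem.List.pyGetD_natCast, List.getD_eq_getElem?_getD,
            List.getElem?_eq_getElem hk, hget]
  rw [hfM, pv_sorted_map, pv_split_loop]
  -- every pair's position is a valid bucket index
  have hbound : ∀ q ∈ pairs, ∃ k : ℕ, q.1 = (k : Int) ∧ k < fpkmAr.length := by
    intro q hq
    rw [hpairs] at hq
    simp only [List.mem_filterMap] at hq
    obtain ⟨g, -, hg⟩ := hq
    rw [hseen, pv_seen_get fpkmAr g.1] at hg
    cases h : PySem.List.index? fpkmAr g.1 with
    | none => rw [h] at hg; simp at hg
    | some k =>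
      rw [h] at hg
      simp only [Option.map_some, Option.some.injEq] at hg
      obtain ⟨hk, -, -⟩ := PySem.List.getElem_of_index?_eq_some h
      exact ⟨k, by rw [← hg], hk⟩
  -- B's buckets are the pvBk buckets in position order
  have hdist : geneAr.foldl (fun bs g =>
      match seen.get? g.1 with
      | some i => bs.set i.toNat (bs.getD i.toNat [] ++ [g.2])
      | none => bs) (fpkmAr.map (fun _ => ([] : List String)))
      = (List.range fpkmAr.length).map (fun k : ℕ => pvBk pairs (k : Int)) := by
    rw [pv_dist_as_pairs, ← hpairs]
    have hlen0 : (fpkmAr.map (fun _ => ([] : List String))).length = fpkmAr.length := by simp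
    have hb : ∀ q ∈ pairs, 0 ≤ q.1 ∧ q.1.toNat < (fpkmAr.map (fun _ => ([] : List String))).length := by
      intro q hq
      obtain ⟨m, hm, hmn⟩ := hbound q hq
      rw [hlen0]
      omega
    apply List.ext_getElem?
    intro k
    rw [pv_dist_getElem? pairs _ hb k]
    by_cases hkn : k < fpkmAr.length
    · rw [List.getElem?_map, List.getElem?_map, List.getElem?_range hkn,
         List.getElem?_eq_getElem hkn]
      rfl
    · have h1 : fpkmAr.length ≤ k := le_of_not_gt hkn
      rw [List.getElem?_map, List.getElem?_map, List.getElem?_eq_none (by simpa using h1),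
          List.getElem?_eq_none (by simpa using h1)]
      rfl
  rw [hdist]
  -- B's enumerate-fold gives the columns of the bucketized stream
  rw [pv_enum_map_range (fun k : ℕ => pvBk pairs (k : Int)) fpkmAr.length, pv_bcols]
  -- the bucketized stream IS the sorted pair stream
  have hT : ((List.range fpkmAr.length).map (fun k : ℕ => ((k : Int), pvBk pairs (k : Int)))).flatMap
        (fun pb => (PySem.List.sorted pb.2 (fun x => x) false).map (fun t => (pb.1, t)))
      = pvBucketize pairs ((List.range fpkmAr.length).map (fun k : ℕ => (k : Int))) := by
    simp only [pvBucketize, List.flatMap_map]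
  have hps_pw : (((List.range fpkmAr.length).map (fun k : ℕ => (k : Int)))).Pairwise (· < ·) := by
    rw [List.pairwise_map]
    exact (List.pairwise_lt_range).imp (by intro a b h; exact_mod_cast h)
  have hps_mem : ∀ q ∈ pairs, q.1 ∈ (List.range fpkmAr.length).map (fun k : ℕ => (k : Int)) := by
    intro q hq
    obtain ⟨m, hm, hmn⟩ := hbound q hq
    simp only [List.mem_map, List.mem_range]
    exact ⟨m, hmn, hm.symm⟩
  rw [hT, ← pv_sorted_eq_bucketize _ hps_pw pairs hps_mem]
  simp [List.map_map, Function.comp_def, pvF]
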